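-- pv_equiv track=rewrite | github.com/akshaychandelkar/PythonTraining | UnionList.py | InvIntersection
-- ===== SOURCE A (Python) =====
-- def InvIntersection(L1,L2):
--     L3 = []
--     i = 0
--     while i < len(L2):
--         if L2[i] not in L1:
--             L3.append(L2[i])
--         else:
--             L1.remove(L2[i])
--         i+=1
--     L3.extend(L1)
--     return L3
-- ===== SOURCE B (Python) =====
-- def InvIntersection(L1, L2):
--     # Counter-based: O(len(L1)+len(L2)) instead of A's O(len(L1)*len(L2)).
--     # Note: unlike A, this does not mutate L1; equivalence is about the return value.
--     cnt = {}
--     for x in L1: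
--         cnt[x] = cnt.get(x, 0) + 1
--     out = []
--     rem = {}
--     for x in L2:
--         if cnt.get(x, 0) > 0:
--             cnt[x] = cnt[x] - 1
--             rem[x] = rem.get(x, 0) + 1
--         else:
--             out.append(x)
--     for x in L1:
--         if rem.get(x, 0) > 0:
--             rem[x] = rem[x] - 1
--         else:
--             out.append(x)
--     return out
-- ===== Notes on version B (the rewrite author's own statement) =====
-- stated objective: faster
-- what changed: replaces A's per-element 'in'/'remove' scans over a mutated L1 with counter dicts: one pass counts L1, one pass over L2 consumes counts (recording removals), one pass over L1 skips the removed occurrences; B does not mutate L1 (return value is identical)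
import Mathlib
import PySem

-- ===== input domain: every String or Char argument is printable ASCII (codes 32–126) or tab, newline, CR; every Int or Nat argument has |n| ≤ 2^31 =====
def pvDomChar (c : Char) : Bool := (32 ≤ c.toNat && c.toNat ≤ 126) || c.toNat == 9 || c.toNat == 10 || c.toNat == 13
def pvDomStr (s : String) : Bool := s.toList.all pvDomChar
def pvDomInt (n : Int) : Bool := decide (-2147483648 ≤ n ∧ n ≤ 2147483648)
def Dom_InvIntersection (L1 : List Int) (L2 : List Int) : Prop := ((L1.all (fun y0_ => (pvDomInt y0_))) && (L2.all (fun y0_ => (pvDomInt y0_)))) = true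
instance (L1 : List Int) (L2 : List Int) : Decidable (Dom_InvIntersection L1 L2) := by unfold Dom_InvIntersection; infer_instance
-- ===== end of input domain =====

-- B replaces A's in-place membership/remove scan over L1 (O(n*m), mutating L1) with
-- hash-counter passes (O(n+m), no mutation of L1); equivalence is about the return value only.


-- ===== PORT A =====
-- Python's list.remove(x): remove the first occurrence (always called with x present here)
def pyRemoveFirst : List Int → Int → List Int
  | [], _ => []
  | y :: t, x => if y = x then t else y :: pyRemoveFirst t x

-- loop body of A's while loop over L2; state = (current L1, L3)
def aStep (s : List Int × List Int) (x : Int) : List Int × List Int :=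
  if x ∉ s.1 then (s.1, s.2 ++ [x]) else (pyRemoveFirst s.1 x, s.2)

def InvIntersection (L1 : List Int) (L2 : List Int) : List Int :=
  let s := L2.foldl aStep (L1, [])
  s.2 ++ s.1

-- ===== PORT B =====
-- loop body of B's pass over L2; state = (cnt, rem, out)
def bStep (s : PySem.Dict Int Int × PySem.Dict Int Int × List Int) (x : Int) :
    PySem.Dict Int Int × PySem.Dict Int Int × List Int :=
  if s.1.getD x 0 > 0 then
    (s.1.insert x (s.1.getD x 0 - 1), s.2.1.insert x (s.2.1.getD x 0 + 1), s.2.2)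
  else (s.1, s.2.1, s.2.2 ++ [x])

-- loop body of B's final pass over L1; state = (rem, out)
def bTailStep (s : PySem.Dict Int Int × List Int) (x : Int) :
    PySem.Dict Int Int × List Int :=
  if s.1.getD x 0 > 0 then (s.1.insert x (s.1.getD x 0 - 1), s.2)
  else (s.1, s.2 ++ [x])

def InvIntersection_alt (L1 : List Int) (L2 : List Int) : List Int :=
  let cnt := L1.foldl (fun d x => d.insert x (d.getD x 0 + 1)) (PySem.Dict.empty : PySem.Dict Int Int)
  let s1 := L2.foldl bStep (cnt, (PySem.Dict.empty : PySem.Dict Int Int), [])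
  let s2 := L1.foldl bTailStep (s1.2.1, s1.2.2)
  s2.2

-- ===== PRECONDITION & SPEC =====
def Spec_InvIntersection (L1 : List Int) (L2 : List Int) (out : List Int) : Prop := out = InvIntersection_alt L1 L2
instance (L1 : List Int) (L2 : List Int) (out : List Int) : Decidable (Spec_InvIntersection L1 L2 out) := by unfold Spec_InvIntersection; infer_instance

-- ===== CLAIM (what is proved, stated in full; the proofs are below) =====
def Claim_equal_InvIntersection : Prop := ∀ (L1 : List Int) (L2 : List Int), Dom_InvIntersection L1 L2 → Spec_InvIntersection L1 L2 (InvIntersection L1 L2)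

-- ===== LEMMAS AND PROOFS =====

-- the suffix appended by B's final pass, as a recursion on L1 with the rem dict
def tailF : List Int → PySem.Dict Int Int → List Int
  | [], _ => []
  | y :: t, rem =>
    if rem.getD y 0 > 0 then tailF t (rem.insert y (rem.getD y 0 - 1)) else y :: tailF t rem

lemma tailRun_eq (L : List Int) : ∀ (rem : PySem.Dict Int Int) (out : List Int),
    (L.foldl bTailStep (rem, out)).2 = out ++ tailF L rem := by
  induction L with
  | nil => intro rem out; simp [tailF]
  | cons y t ih =>
    intro rem out
    simp only [List.foldl_cons, bTailStep, tailF]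
    by_cases h : rem.getD y 0 > 0 <;> simp [h, ih]

lemma tailF_congr (L : List Int) : ∀ (r r' : PySem.Dict Int Int),
    (∀ z, r.getD z 0 = r'.getD z 0) → tailF L r = tailF L r' := by
  induction L with
  | nil => intro _ _ _; rfl
  | cons y t ih =>
    intro r r' h
    simp only [tailF, h y]
    by_cases hy : r'.getD y 0 > 0 <;> simp only [hy, if_pos, if_neg, not_false_iff]
    · exact ih _ _ (by intro z; simp [PySem.Dict.getD_insert, h y, h z])
    · simp [hy, ih _ _ h]

lemma tailF_empty (L : List Int) : tailF L (PySem.Dict.empty : PySem.Dict Int Int) = L := by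
  induction L with
  | nil => rfl
  | cons y t ih => simp [tailF, PySem.Dict.getD_empty, ih]

-- incrementing rem at a present x removes the first occurrence of x from the kept suffix
lemma tailF_insert_inc (L : List Int) : ∀ (rem : PySem.Dict Int Int) (x : Int),
    (∀ z, 0 ≤ rem.getD z 0) → x ∈ tailF L rem →
    tailF L (rem.insert x (rem.getD x 0 + 1)) = pyRemoveFirst (tailF L rem) x := by
  induction L with
  | nil => intro rem x _ hmem; simp [tailF] at hmem
  | cons y t ih =>
    intro rem x hnn hmem
    by_cases hy : rem.getD y 0 > 0
    · -- kept branch of the original would have been the decrement branch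
      by_cases hxy : y = x
      · subst hxy
        have h1 : (rem.insert y (rem.getD y 0 + 1)).getD y 0 > 0 := by
          simp [PySem.Dict.getD_insert]; omega
        simp only [tailF, if_pos hy, if_pos h1] at *
        rw [PySem.Dict.getD_insert_self, PySem.Dict.insert_insert_self]
        have h2 : rem.getD y 0 + 1 - 1 = rem.getD y 0 := by omega
        rw [h2]
        have := ih (rem.insert y (rem.getD y 0 - 1)) y
          (by intro z; simp [PySem.Dict.getD_insert]; split <;> [omega; exact hnn z]) hmem
        rw [PySem.Dict.getD_insert_self, PySem.Dict.insert_insert_self] at this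
        have h3 : rem.getD y 0 - 1 + 1 = rem.getD y 0 := by omega
        rw [h3] at this
        exact this
      · have hgy : (rem.insert x (rem.getD x 0 + 1)).getD y 0 = rem.getD y 0 := by
          rw [PySem.Dict.getD_insert]; simp [fun h => hxy h]
        have h1 : (rem.insert x (rem.getD x 0 + 1)).getD y 0 > 0 := by rw [hgy]; exact hy
        simp only [tailF, if_pos hy, if_pos h1] at *
        rw [hgy]
        have hc : tailF t ((rem.insert x (rem.getD x 0 + 1)).insert y (rem.getD y 0 - 1))
            = tailF t ((rem.insert y (rem.getD y 0 - 1)).insert x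
                ((rem.insert y (rem.getD y 0 - 1)).getD x 0 + 1)) := by
          apply tailF_congr
          intro z
          simp only [PySem.Dict.getD_insert]
          by_cases hzy : z = y <;> by_cases hzx : z = x <;> simp_all
        rw [hc]
        exact ih _ x
          (by intro z; simp [PySem.Dict.getD_insert]; split <;> [omega; exact hnn z]) hmem
    · by_cases hxy : y = x
      · subst hxy
        have h1 : (rem.insert y (rem.getD y 0 + 1)).getD y 0 > 0 := by
          rw [PySem.Dict.getD_insert_self]; have := hnn y; omega
        simp only [tailF, if_neg hy, if_pos h1, pyRemoveFirst, if_pos rfl]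
        rw [PySem.Dict.getD_insert_self, PySem.Dict.insert_insert_self]
        have h2 : rem.getD y 0 + 1 - 1 = rem.getD y 0 := by omega
        rw [h2]
        apply tailF_congr
        intro z
        simp [PySem.Dict.getD_insert]
        intro h; subst h; rfl
      · have h1 : ¬ (rem.insert x (rem.getD x 0 + 1)).getD y 0 > 0 := by
          rw [PySem.Dict.getD_insert]; simp [fun h => hxy h]; exact le_of_not_gt hy
        simp only [tailF, if_neg hy] at hmem
        have hmem' : x ∈ tailF t rem := by
          rcases List.mem_cons.mp hmem with h | h
          · exact absurd h.symm hxy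
          · exact h
        simp only [tailF, if_neg hy, if_neg h1, pyRemoveFirst,
          if_neg (fun h => hxy h)]
        rw [ih rem x hnn hmem']

-- count after removing the first occurrence of a present element
lemma count_pyRemoveFirst (S : List Int) : ∀ (x : Int), x ∈ S → ∀ z,
    ((pyRemoveFirst S x).count z : Int) = (S.count z : Int) - (if z = x then 1 else 0) := by
  induction S with
  | nil => intro x hx; simp at hx
  | cons y t ih =>
    intro x hx z
    by_cases hyx : y = x
    · subst hyx
      simp only [pyRemoveFirst, if_pos rfl, List.count_cons]
      by_cases hzx : z = y <;> simp [hzx] <;> omega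
    · have hx' : x ∈ t := by
        rcases List.mem_cons.mp hx with h | h
        · exact absurd h.symm hyx
        · exact h
      simp only [pyRemoveFirst, if_neg hyx, List.count_cons]
      have := ih x hx' z
      by_cases hzy : z = y <;> simp [hzy] at this ⊢ <;> push_cast at this ⊢ <;> omega

-- main simultaneous induction over the L2 pass
lemma main_loop (xs : List Int) (L1 : List Int) :
    ∀ (S acc : List Int) (cnt rem : PySem.Dict Int Int),
    (∀ z, cnt.getD z 0 = (S.count z : Int)) →
    (∀ z, 0 ≤ rem.getD z 0) →
    tailF L1 rem = S →
    (xs.foldl aStep (S, acc)).2 ++ (xs.foldl aStep (S, acc)).1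
      = (xs.foldl bStep (cnt, rem, acc)).2.2
        ++ tailF L1 (xs.foldl bStep (cnt, rem, acc)).2.1 := by
  induction xs with
  | nil => intro S acc cnt rem _ _ ht; simpa using ht.symm
  | cons x xs ih =>
    intro S acc cnt rem hc hnn ht
    by_cases hmem : x ∈ S
    · have hpos : cnt.getD x 0 > 0 := by
        rw [hc x]; exact_mod_cast List.count_pos_iff.mpr hmem
      simp only [List.foldl_cons, aStep, bStep, if_neg (not_not_intro hmem), if_pos hpos]
      apply ih
      · intro z
        rw [PySem.Dict.getD_insert, hc x, count_pyRemoveFirst S x hmem z]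
        split <;> simp_all
      · intro z
        rw [PySem.Dict.getD_insert]
        split
        · have := hnn x; omega
        · exact hnn z
      · rw [tailF_insert_inc L1 rem x hnn (ht ▸ hmem), ht]
    · have hpos : ¬ cnt.getD x 0 > 0 := by
        rw [hc x]
        simp [List.count_eq_zero.mpr hmem]
      simp only [List.foldl_cons, aStep, bStep, if_pos hmem, if_neg hpos]
      exact ih S (acc ++ [x]) cnt rem hc hnn ht

-- ===== VERDICT (by name: the statement is the Claim_ definition above) =====
theorem InvIntersection_spec : Claim_equal_InvIntersection := by
  intro L1 L2 _
  unfold Spec_InvIntersection InvIntersection InvIntersection_alt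
  rw [tailRun_eq]
  exact main_loop L2 L1 L1 [] _ PySem.Dict.empty
    (by intro z
        rw [PySem.Dict.getD_foldl_insert_add_one, PySem.Dict.getD_empty]
        simp)
    (by intro z; rw [PySem.Dict.getD_empty])
    (tailF_empty L1)
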